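-- pv_equiv track=rewrite | github.com/GimYoungPhil/Cracking_Codes_with_Python | src/ch20/hacker.py | makeMatrix2
-- ===== SOURCE A (Python) =====
-- def makeMatrix2(listA, listB):
--     lenA = len(listA)
--     lenB = len(listB)
--     matrix = []
--
--     for index in range(lenA * lenB):
--         temp = []
--         temp.extend(listA[int(index / lenB)])
--         temp.extend(listB[int(index % lenB)])
--         matrix.append(temp)
--
--     return matrix
-- ===== SOURCE B (Python) =====
-- def makeMatrix2(listA, listB):
--     if not listA:
--         return []
--     return [listA[0] + b for b in listB] + makeMatrix2(listA[1:], listB)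
-- ===== Notes on version B (the rewrite author's own statement) =====
-- stated objective: alternative
-- what changed: Replaced the flat indexed loop with its index//lenB and index%lenB arithmetic by structural recursion on listA: each call emits the block for the head row by a comprehension over listB and recurses on the tail.
import Mathlib
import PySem

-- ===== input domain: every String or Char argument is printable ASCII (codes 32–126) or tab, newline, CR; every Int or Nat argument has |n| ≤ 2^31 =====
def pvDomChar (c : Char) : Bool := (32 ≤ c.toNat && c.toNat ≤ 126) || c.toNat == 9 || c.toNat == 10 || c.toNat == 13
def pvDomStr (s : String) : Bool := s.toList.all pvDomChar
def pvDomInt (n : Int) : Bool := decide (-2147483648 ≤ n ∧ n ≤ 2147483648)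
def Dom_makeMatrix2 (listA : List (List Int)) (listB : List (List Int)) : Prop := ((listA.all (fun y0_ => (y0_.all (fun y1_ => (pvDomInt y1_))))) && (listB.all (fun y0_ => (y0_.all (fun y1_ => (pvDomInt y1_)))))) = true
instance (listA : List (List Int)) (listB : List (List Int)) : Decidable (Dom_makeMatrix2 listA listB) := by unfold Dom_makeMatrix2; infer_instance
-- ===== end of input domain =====

-- B replaces the flat index loop by structural recursion on listA; same cost, different decomposition.
-- ===== PORT A =====
-- int(index / lenB): index ≥ 0 and the loop runs only when lenB > 0, so this equals floor
-- division index // lenB; ported as PySem.Int.floordiv (exact here).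
def makeMatrix2 (listA : List (List Int)) (listB : List (List Int)) : List (List Int) :=
  let lenA : Int := listA.length
  let lenB : Int := listB.length
  let matrix : List (List Int) := []
  (PySem.List.pyRange 0 (lenA * lenB) 1).foldl
    (fun matrix index =>
      let temp : List Int := []
      let temp := temp ++ PySem.List.pyGetD listA (PySem.Int.floordiv index lenB) []
      let temp := temp ++ PySem.List.pyGetD listB (PySem.Int.mod index lenB) []
      matrix ++ [temp]) matrix

-- ===== PORT B =====
-- Source B recurses on listA: the empty case returns [], else the head's block
-- (a comprehension over listB) followed by the recursive call on listA[1:].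
def makeMatrix2_alt (listA : List (List Int)) (listB : List (List Int)) : List (List Int) :=
  match listA with
  | [] => []
  | a :: tl => listB.map (fun b => a ++ b) ++ makeMatrix2_alt tl listB

-- ===== PRECONDITION & SPEC =====
def Spec_makeMatrix2 (listA : List (List Int)) (listB : List (List Int)) (out : List (List Int)) : Prop := out = makeMatrix2_alt listA listB
instance (listA : List (List Int)) (listB : List (List Int)) (out : List (List Int)) : Decidable (Spec_makeMatrix2 listA listB out) := by unfold Spec_makeMatrix2; infer_instance

-- ===== CLAIM (what is proved, stated in full; the proofs are below) =====
def Claim_equal_makeMatrix2 : Prop := ∀ (listA : List (List Int)) (listB : List (List Int)), Dom_makeMatrix2 listA listB → Spec_makeMatrix2 listA listB (makeMatrix2 listA listB)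

-- ===== LEMMAS AND PROOFS =====
-- getD over range(len) rebuilds the list
theorem getD_range_self (xs : List (List Int)) :
    (List.range xs.length).map (fun k => xs.getD k []) = xs := by
  apply List.ext_getElem
  · simp
  · intro i h1 h2
    simp [List.getD, List.getElem?_eq_getElem h2]

-- with an empty listB the recursion emits nothing
theorem alt_nil_right (lA : List (List Int)) : makeMatrix2_alt lA [] = [] := by
  induction lA with
  | nil => simp [makeMatrix2_alt]
  | cons _ _ ih => simp [makeMatrix2_alt, ih]

-- the flat-index construction equals B's recursive construction
theorem key (lA lB : List (List Int)) :
    (List.range (lA.length * lB.length)).map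
      (fun k => lA.getD (k / lB.length) [] ++ lB.getD (k % lB.length) [])
      = makeMatrix2_alt lA lB := by
  induction lA with
  | nil => simp [makeMatrix2_alt]
  | cons a tl ih =>
    rcases Nat.eq_zero_or_pos lB.length with hm | hm
    · rw [List.length_eq_zero_iff.mp hm]
      simp [alt_nil_right, makeMatrix2_alt]
    · have hsplit : (a :: tl).length * lB.length = lB.length + tl.length * lB.length := by
        simp; ring
      rw [hsplit, List.range_add, List.map_append, List.map_map, makeMatrix2_alt]
      congr 1
      · rw [List.map_congr_left (g := fun k => a ++ lB.getD k [])
          (by intro k hk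
              have hk' : k < lB.length := List.mem_range.mp hk
              simp [Nat.div_eq_of_lt hk', Nat.mod_eq_of_lt hk'])]
        conv_rhs => rw [← getD_range_self lB]
        rw [List.map_map]
        rfl
      · rw [← ih]
        apply List.map_congr_left
        intro k _
        have h1 : (lB.length + k) / lB.length = k / lB.length + 1 := by
          rw [Nat.add_comm, Nat.add_div_right _ hm]
        have h2 : (lB.length + k) % lB.length = k % lB.length := Nat.add_mod_left _ _
        simp [Function.comp, h1, h2]

-- ===== VERDICT (by name: the statement is the Claim_ definition above) =====
theorem makeMatrix2_spec : Claim_equal_makeMatrix2 := by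
  intro lA lB _
  unfold Spec_makeMatrix2 makeMatrix2
  rw [PySem.List.foldl_append_singleton_eq_map, PySem.List.pyRange_one]
  simp only [List.nil_append, List.map_map]
  rw [← key lA lB]
  have hcast : ((lA.length : Int) * (lB.length : Int) - 0).toNat = lA.length * lB.length := by
    omega
  rw [hcast]
  apply List.map_congr_left
  intro k _
  simp only [Function.comp, Int.zero_add, PySem.Int.floordiv_natCast,
    PySem.Int.mod_natCast, PySem.List.pyGetD_natCast]
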